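-- pv_equiv track=rewrite | github.com/Penitto/go_documentation | go_template/generator.py | _mask_string_literals
-- ===== SOURCE A (Python) =====
-- from typing import Callable, Dict, Iterable, List, Optional, Tuple
--
-- def _mask_string_literals(source: str) -> str:
--     chars = list(source)
--     i = 0
--     length = len(source)
--     while i < length:
--         ch = source[i]
--         if ch == '"':
--             i = _mask_quoted_string(chars, source, i, '"')
--         elif ch == "'":
--             i = _mask_quoted_string(chars, source, i, "'")
--         elif ch == "`":
--             i = _mask_raw_string_literal(chars, source, i)
--         else:
--             i += 1
--     return "".join(chars)
--
-- def _mask_quoted_string(chars: List[str], source: str, start: int, quote: str) -> int: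
--     i = start + 1
--     length = len(source)
--     while i < length:
--         ch = source[i]
--         chars[i] = " "
--         if ch == "\\":
--             if i + 1 < length:
--                 chars[i + 1] = " "
--             i += 2
--             continue
--         if ch == quote:
--             return i + 1
--         i += 1
--     return length
--
-- def _mask_raw_string_literal(chars: List[str], source: str, start: int) -> int:
--     i = start + 1
--     length = len(source)
--     while i < length:
--         ch = source[i]
--         if ch == "`":
--             return i + 1
--         chars[i] = " " if ch != "\n" else "\n"
--         i += 1
--     return length
-- ===== SOURCE B (Python) =====
-- # Single linear pass with an explicit state variable (normal / quoted / raw),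
-- # streaming characters into an output list instead of index-jumping helper loops.
-- NORMAL, QUOTED, RAW = 0, 1, 2
--
-- def _mask_string_literals(source: str) -> str:
--     out = []
--     state = NORMAL
--     quote = ''
--     i = 0
--     n = len(source)
--     while i < n:
--         ch = source[i]
--         if state == NORMAL:
--             out.append(ch)
--             if ch == '"' or ch == "'":
--                 state = QUOTED
--                 quote = ch
--             elif ch == '`':
--                 state = RAW
--         elif state == QUOTED:
--             out.append(' ')
--             if ch == '\\':
--                 if i + 1 < n:
--                     out.append(' ')
--                 i += 1
--             elif ch == quote:
--                 state = NORMAL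
--         else:  # RAW
--             if ch == '`':
--                 out.append(ch)
--                 state = NORMAL
--             else:
--                 out.append('\n' if ch == '\n' else ' ')
--         i += 1
--     return ''.join(out)
-- ===== Notes on version B (the rewrite author's own statement) =====
-- stated objective: alternative
-- what changed: A walks the source with an outer index loop that hands control to two helper functions which mutate a pre-built character-list copy in place and jump the index forward; B is a single streaming left-to-right pass with an explicit state variable (NORMAL/QUOTED/RAW) and an output list built as it goes, with no helpers and no mutable copy of the source.
import Mathlib
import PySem

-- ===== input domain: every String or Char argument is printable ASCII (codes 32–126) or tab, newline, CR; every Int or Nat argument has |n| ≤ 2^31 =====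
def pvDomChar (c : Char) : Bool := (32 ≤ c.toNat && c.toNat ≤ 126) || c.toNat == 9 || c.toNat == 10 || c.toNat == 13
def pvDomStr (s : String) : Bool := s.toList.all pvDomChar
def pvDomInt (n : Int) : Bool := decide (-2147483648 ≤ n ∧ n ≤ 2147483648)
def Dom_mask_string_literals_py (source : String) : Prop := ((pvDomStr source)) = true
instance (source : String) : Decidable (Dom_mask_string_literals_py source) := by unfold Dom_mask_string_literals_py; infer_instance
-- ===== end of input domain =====

-- B replaces A's index-jumping helper loops (which mutate a copy of the source in place)
-- by one streaming left-to-right pass with an explicit state variable; same return value, not faster.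

-- ===== PORT A =====
-- _mask_quoted_string's while loop (chars is the mutable list, i the index; gas is a structural
-- bound on the remaining iterations — it starts at source.length and never runs out before the
-- loop's own exit condition, so it only makes the recursion total)
def maskQuotedLoopA : Nat → List Char → List Char → Nat → Char → List Char × Nat
  | 0, chars, source, _, _ => (chars, source.length)
  | gas + 1, chars, source, i, quote =>
    if h : i < source.length then
      let ch := source[i]
      let chars1 := chars.set i ' '
      if ch = '\\' then
        let chars2 := if i + 1 < source.length then chars1.set (i + 1) ' ' else chars1
        maskQuotedLoopA gas chars2 source (i + 2) quote
      else if ch = quote then (chars1, i + 1)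
      else maskQuotedLoopA gas chars1 source (i + 1) quote
    else (chars, source.length)

-- _mask_quoted_string: i = start + 1 then the loop
def maskQuotedA (chars source : List Char) (start : Nat) (quote : Char) : List Char × Nat :=
  maskQuotedLoopA source.length chars source (start + 1) quote

-- _mask_raw_string_literal's while loop
def maskRawLoopA : Nat → List Char → List Char → Nat → List Char × Nat
  | 0, chars, source, _ => (chars, source.length)
  | gas + 1, chars, source, i =>
    if h : i < source.length then
      let ch := source[i]
      if ch = '`' then (chars, i + 1)
      else maskRawLoopA gas (chars.set i (if ch = '\n' then '\n' else ' ')) source (i + 1)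
    else (chars, source.length)

def maskRawA (chars source : List Char) (start : Nat) : List Char × Nat :=
  maskRawLoopA source.length chars source (start + 1)

-- _mask_string_literals's outer while loop (the index strictly increases each iteration, so
-- source.length gas is always enough; when gas is 0 the index is already ≥ source.length)
def maskLoopA : Nat → List Char → List Char → Nat → List Char
  | 0, chars, _, _ => chars
  | gas + 1, chars, source, i =>
    if h : i < source.length then
      let ch := source[i]
      if ch = '"' then
        let p := maskQuotedA chars source i '"'
        maskLoopA gas p.1 source p.2
      else if ch = '\'' then
        let p := maskQuotedA chars source i '\''
        maskLoopA gas p.1 source p.2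
      else if ch = '`' then
        let p := maskRawA chars source i
        maskLoopA gas p.1 source p.2
      else maskLoopA gas chars source (i + 1)
    else chars

def mask_string_literals_py (source : String) : String :=
  String.mk (maskLoopA source.toList.length source.toList source.toList 0)

-- ===== PORT B =====
-- Source B's single while loop; state 0 = NORMAL, 1 = QUOTED, 2 = RAW; the two appends of the
-- backslash step consume two characters at once, exactly as the i += 1 / i += 1 pair does.
def maskLoopB : List Char → Nat → Char → List Char
  | [], _, _ => []
  | ch :: rest, st, q =>
    if st = 0 then
      ch :: (if ch = '"' ∨ ch = '\'' then maskLoopB rest 1 ch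
             else if ch = '`' then maskLoopB rest 2 q
             else maskLoopB rest 0 q)
    else if st = 1 then
      if ch = '\\' then
        ' ' :: (match rest with
                | [] => []
                | _ :: rest' => ' ' :: maskLoopB rest' 1 q)
      else if ch = q then ' ' :: maskLoopB rest 0 q
      else ' ' :: maskLoopB rest 1 q
    else
      if ch = '`' then ch :: maskLoopB rest 0 q
      else (if ch = '\n' then '\n' else ' ') :: maskLoopB rest 2 q

-- python's quote is initialised to '' and never read before being assigned; ' ' stands in for it
def mask_string_literals_py_alt (source : String) : String :=
  String.mk (maskLoopB source.toList 0 ' ')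

-- ===== PRECONDITION & SPEC =====
def Spec_mask_string_literals_py (source : String) (out : String) : Prop := out = mask_string_literals_py_alt source
instance (source : String) (out : String) : Decidable (Spec_mask_string_literals_py source out) := by unfold Spec_mask_string_literals_py; infer_instance

-- ===== CLAIM (what is proved, stated in full; the proofs are below) =====
def Claim_equal_mask_string_literals_py : Prop := ∀ (source : String), Dom_mask_string_literals_py source → Spec_mask_string_literals_py source (mask_string_literals_py source)

-- ===== LEMMAS AND PROOFS =====


theorem maskLoopB_nil (st : Nat) (q : Char) : maskLoopB [] st q = [] := by
  rw [maskLoopB.eq_def]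

theorem pvDropSucc {l m : List Char} {j : Nat} (h : l.drop j = m.drop j) :
    l.drop (j+1) = m.drop (j+1) := by
  have := congrArg List.tail h; simpa [List.tail_drop] using this

theorem pvGetEq {l m : List Char} {j : Nat} (hj : j < l.length) (hm : j < m.length)
    (h : l.drop j = m.drop j) : l[j] = m[j] := by
  have := congrArg List.head? h
  simpa [List.head?_drop, List.getElem?_eq_getElem, hj, hm] using this

theorem pvTakeSetSucc (l : List Char) (j : Nat) (hj : j < l.length) (a : Char) :
    (l.set j a).take (j+1) = l.take j ++ [a] := by
  rw [List.set_eq_take_cons_drop a hj, List.take_append]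
  simp [Nat.min_eq_left (le_of_lt hj)]

theorem pvTakeSucc (l : List Char) (j : Nat) (hj : j < l.length) :
    l.take (j+1) = l.take j ++ [l[j]] := by
  rw [List.take_succ]; simp [List.getElem?_eq_getElem hj]

theorem pvDropAppend2 (a b c : List Char) (n : Nat) (h : a.length + b.length = n) :
    (a ++ b ++ c).drop n = c := by
  rw [List.drop_append,
      List.drop_eq_nil_of_le (show (a ++ b).length ≤ n by rw [List.length_append]; omega),
      show n - (a ++ b).length = 0 by rw [List.length_append]; omega]
  simp

theorem pvTakeAppend2 (a b c : List Char) (n : Nat) (h : a.length + b.length = n) :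
    (a ++ b ++ c).take n = a ++ b := by
  rw [List.take_append,
      List.take_of_length_le (show (a ++ b).length ≤ n by rw [List.length_append]; omega),
      show n - (a ++ b).length = 0 by rw [List.length_append]; omega]
  simp

theorem quoted_seg (src : List Char) (q : Char) :
    ∀ k j chars, src.length - j ≤ k → chars.length = src.length → chars.drop j = src.drop j →
      j ≤ src.length →
      ∃ seg : List Char,
        maskQuotedLoopA k chars src j q = (chars.take j ++ seg ++ src.drop (j + seg.length), j + seg.length)
        ∧ j + seg.length ≤ src.length
        ∧ maskLoopB (src.drop j) 1 q = seg ++ maskLoopB (src.drop (j + seg.length)) 0 q := by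
  intro k
  induction k with
  | zero =>
    intro j chars hk hlen hdrop hj
    have hje : j = src.length := by omega
    subst hje
    refine ⟨[], ?_, by simp, ?_⟩
    · simp [maskQuotedLoopA, ← hlen]
    · simp [maskLoopB_nil]
  | succ k ih =>
    intro j chars hk hlen hdrop hj
    by_cases hlt : j < src.length
    · have hmlt : j < chars.length := by omega
      have hget : chars[j] = src[j] := pvGetEq hmlt hlt hdrop
      have hdrop1 : chars.drop (j+1) = src.drop (j+1) := pvDropSucc hdrop
      have hsd : src.drop j = src[j] :: src.drop (j+1) := List.drop_eq_getElem_cons hlt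
      rw [maskQuotedLoopA]
      simp only [hlt, ↓reduceDIte]
      by_cases hb : src[j] = '\\'
      · simp only [hb, reduceIte]
        by_cases h2 : j + 1 < src.length
        · simp only [h2, ↓reduceIte]
          have hlen2 : ((chars.set j ' ').set (j+1) ' ').length = src.length := by simp [hlen]
          have hdrop2 : ((chars.set j ' ').set (j+1) ' ').drop (j+2) = src.drop (j+2) := by
            rw [List.drop_set, List.drop_set,
                if_pos (by omega : j+1 < j+2), if_pos (by omega : j < j+2)]
            exact pvDropSucc hdrop1
          obtain ⟨seg, hA, hle, hB⟩ := ih (j+2) ((chars.set j ' ').set (j+1) ' ')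
            (by omega) hlen2 hdrop2 (by omega)
          have ht : ((chars.set j ' ').set (j+1) ' ').take (j+2) = chars.take j ++ [' ', ' '] := by
            rw [pvTakeSetSucc (chars.set j ' ') (j+1) (by simp; omega) ' ',
                pvTakeSetSucc chars j hmlt ' ']
            simp
          have hsd2 : src.drop (j+1) = src[j+1] :: src.drop (j+2) := List.drop_eq_getElem_cons h2
          refine ⟨' ' :: ' ' :: seg, ?_, by simp; omega, ?_⟩
          · rw [hA, ht]
            have harith : j + (seg.length + 2) = j + 2 + seg.length := by omega
            simp [harith]
          · rw [hsd, hsd2]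
            conv_lhs => rw [maskLoopB.eq_def]
            have harith : j + (seg.length + 1 + 1) = j + 2 + seg.length := by omega
            simp [hb, hB, harith]
        · have hje : j + 1 = src.length := by omega
          simp only [h2, ↓reduceIte]
          have hcall : maskQuotedLoopA k (chars.set j ' ') src (j+2) q = (chars.set j ' ', src.length) := by
            cases k with
            | zero => simp [maskQuotedLoopA]
            | succ k => rw [maskQuotedLoopA, dif_neg (by omega : ¬ (j + 2 < src.length))]
          rw [hcall]
          refine ⟨[' '], ?_, by simp; omega, ?_⟩
          · rw [List.set_eq_take_cons_drop ' ' hmlt, hdrop1]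
            simp [show src.length = j + 1 by omega]
          · rw [hsd, hb]
            have hnil : src.drop (j+1) = [] := by rw [hje]; simp
            rw [hnil]
            conv_lhs => rw [maskLoopB.eq_def]
            simp [hnil, maskLoopB_nil]
      · simp only [hb, ↓reduceIte]
        by_cases hq : src[j] = q
        · simp only [hq, reduceIte]
          refine ⟨[' '], ?_, by simp; omega, ?_⟩
          · rw [List.set_eq_take_cons_drop ' ' hmlt, hdrop1]
            simp
          · have hqb : ¬ (q = '\\') := by rw [← hq]; exact hb
            rw [hsd, hq]
            conv_lhs => rw [maskLoopB.eq_def]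
            simp [hqb]
        · simp only [hq, ↓reduceIte]
          have hlen1 : (chars.set j ' ').length = src.length := by simp [hlen]
          have hdropA : (chars.set j ' ').drop (j+1) = src.drop (j+1) := by
            rw [List.drop_set, if_pos (by omega : j < j+1)]
            exact hdrop1
          obtain ⟨seg, hA, hle, hB⟩ := ih (j+1) (chars.set j ' ') (by omega) hlen1 hdropA (by omega)
          refine ⟨' ' :: seg, ?_, by simp; omega, ?_⟩
          · rw [hA, pvTakeSetSucc chars j hmlt ' ']
            have harith : j + (seg.length + 1) = j + 1 + seg.length := by omega
            simp [harith]
          · rw [hsd]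
            conv_lhs => rw [maskLoopB.eq_def]
            have harith : j + (seg.length + 1) = j + 1 + seg.length := by omega
            simp [hb, hq, hB, harith]
    · have hje : j = src.length := by omega
      subst hje
      refine ⟨[], ?_, by simp, ?_⟩
      · simp [maskQuotedLoopA, ← hlen]
      · simp [maskLoopB_nil]

theorem raw_seg (src : List Char) (q : Char) :
    ∀ k j chars, src.length - j ≤ k → chars.length = src.length → chars.drop j = src.drop j →
      j ≤ src.length →
      ∃ seg : List Char,
        maskRawLoopA k chars src j = (chars.take j ++ seg ++ src.drop (j + seg.length), j + seg.length)
        ∧ j + seg.length ≤ src.length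
        ∧ maskLoopB (src.drop j) 2 q = seg ++ maskLoopB (src.drop (j + seg.length)) 0 q := by
  intro k
  induction k with
  | zero =>
    intro j chars hk hlen hdrop hj
    have hje : j = src.length := by omega
    subst hje
    refine ⟨[], ?_, by simp, ?_⟩
    · simp [maskRawLoopA, ← hlen]
    · simp [maskLoopB_nil]
  | succ k ih =>
    intro j chars hk hlen hdrop hj
    by_cases hlt : j < src.length
    · have hmlt : j < chars.length := by omega
      have hget : chars[j] = src[j] := pvGetEq hmlt hlt hdrop
      have hdrop1 : chars.drop (j+1) = src.drop (j+1) := pvDropSucc hdrop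
      have hsd : src.drop j = src[j] :: src.drop (j+1) := List.drop_eq_getElem_cons hlt
      rw [maskRawLoopA]
      simp only [hlt, ↓reduceDIte]
      by_cases hbt : src[j] = '`'
      · simp only [hbt, ↓reduceIte]
        refine ⟨['`'], ?_, by simp; omega, ?_⟩
        · have hdec : chars = chars.take j ++ chars[j] :: chars.drop (j+1) := by
            conv_lhs => rw [← List.take_append_drop j chars]
            rw [List.drop_eq_getElem_cons hmlt]
          rw [hget, hbt, hdrop1] at hdec
          conv_lhs => rw [hdec]
          simp
        · rw [hsd, hbt]
          conv_lhs => rw [maskLoopB.eq_def]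
          simp
      · simp only [hbt, ↓reduceIte]
        have hlen1 : (chars.set j (if src[j] = '\n' then '\n' else ' ')).length = src.length := by
          simp [hlen]
        have hdropA : (chars.set j (if src[j] = '\n' then '\n' else ' ')).drop (j+1) = src.drop (j+1) := by
          rw [List.drop_set, if_pos (by omega : j < j+1)]
          exact hdrop1
        obtain ⟨seg, hA, hle, hB⟩ := ih (j+1) (chars.set j (if src[j] = '\n' then '\n' else ' '))
          (by omega) hlen1 hdropA (by omega)
        refine ⟨(if src[j] = '\n' then '\n' else ' ') :: seg, ?_, by simp; omega, ?_⟩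
        · rw [hA, pvTakeSetSucc chars j hmlt]
          have harith : j + (seg.length + 1) = j + 1 + seg.length := by omega
          simp [harith]
        · rw [hsd]
          conv_lhs => rw [maskLoopB.eq_def]
          have harith : j + (seg.length + 1) = j + 1 + seg.length := by omega
          simp [hbt, hB, harith]
    · have hje : j = src.length := by omega
      subst hje
      refine ⟨[], ?_, by simp, ?_⟩
      · simp [maskRawLoopA, ← hlen]
      · simp [maskLoopB_nil]

theorem main_seg (src : List Char) :
    ∀ k q j chars, src.length - j ≤ k → chars.length = src.length → chars.drop j = src.drop j →
      maskLoopA k chars src j = chars.take j ++ maskLoopB (src.drop j) 0 q := by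
  intro k
  induction k with
  | zero =>
    intro q j chars hk hlen hdrop
    rw [List.drop_eq_nil_of_le (by omega : src.length ≤ j)]
    simp [maskLoopA, maskLoopB_nil, List.take_of_length_le (by omega : chars.length ≤ j)]
  | succ k ih =>
    intro q j chars hk hlen hdrop
    by_cases hlt : j < src.length
    · have hmlt : j < chars.length := by omega
      have hget : chars[j] = src[j] := pvGetEq hmlt hlt hdrop
      have hdrop1 : chars.drop (j+1) = src.drop (j+1) := pvDropSucc hdrop
      have hsd : src.drop j = src[j] :: src.drop (j+1) := List.drop_eq_getElem_cons hlt
      rw [maskLoopA]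
      simp only [hlt, ↓reduceDIte]
      by_cases h1 : src[j] = '"'
      · simp only [h1, ↓reduceIte]
        obtain ⟨seg, hA, hle, hB⟩ :=
          quoted_seg src '"' src.length (j+1) chars (by omega) hlen hdrop1 (by omega)
        simp only [maskQuotedA]
        rw [hA]
        have hplen : (chars.take (j+1) ++ seg ++ src.drop (j+1+seg.length)).length = src.length := by
          simp [List.length_take, List.length_drop]; omega
        have hpdrop : (chars.take (j+1) ++ seg ++ src.drop (j+1+seg.length)).drop (j+1+seg.length)
            = src.drop (j+1+seg.length) :=
          pvDropAppend2 _ _ _ _ (by simp [List.length_take]; omega)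
        rw [ih '"' (j+1+seg.length) _ (by omega) hplen hpdrop]
        rw [pvTakeAppend2 _ _ _ _ (by simp [List.length_take]; omega)]
        rw [hsd]
        conv_rhs => rw [maskLoopB.eq_def]
        rw [pvTakeSucc chars j hmlt, hget]
        simp [h1, hB]
      · simp only [h1, ↓reduceIte]
        by_cases h2 : src[j] = '\''
        · simp only [h2, ↓reduceIte]
          obtain ⟨seg, hA, hle, hB⟩ :=
            quoted_seg src '\'' src.length (j+1) chars (by omega) hlen hdrop1 (by omega)
          simp only [maskQuotedA]
          rw [hA]
          have hplen : (chars.take (j+1) ++ seg ++ src.drop (j+1+seg.length)).length = src.length := by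
            simp [List.length_take, List.length_drop]; omega
          have hpdrop : (chars.take (j+1) ++ seg ++ src.drop (j+1+seg.length)).drop (j+1+seg.length)
              = src.drop (j+1+seg.length) :=
            pvDropAppend2 _ _ _ _ (by simp [List.length_take]; omega)
          rw [ih '\'' (j+1+seg.length) _ (by omega) hplen hpdrop]
          rw [pvTakeAppend2 _ _ _ _ (by simp [List.length_take]; omega)]
          rw [hsd]
          conv_rhs => rw [maskLoopB.eq_def]
          rw [pvTakeSucc chars j hmlt, hget]
          simp [h2, hB]
        · by_cases h3 : src[j] = '`'
          · simp only [h3, ↓reduceIte]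
            obtain ⟨seg, hA, hle, hB⟩ :=
              raw_seg src q src.length (j+1) chars (by omega) hlen hdrop1 (by omega)
            simp only [maskRawA]
            rw [hA]
            have hplen : (chars.take (j+1) ++ seg ++ src.drop (j+1+seg.length)).length = src.length := by
              simp [List.length_take, List.length_drop]; omega
            have hpdrop : (chars.take (j+1) ++ seg ++ src.drop (j+1+seg.length)).drop (j+1+seg.length)
                = src.drop (j+1+seg.length) :=
              pvDropAppend2 _ _ _ _ (by simp [List.length_take]; omega)
            rw [ih q (j+1+seg.length) _ (by omega) hplen hpdrop]
            rw [pvTakeAppend2 _ _ _ _ (by simp [List.length_take]; omega)]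
            rw [hsd]
            conv_rhs => rw [maskLoopB.eq_def]
            rw [pvTakeSucc chars j hmlt, hget]
            simp [h3, hB]
          · simp only [h3, ↓reduceIte]
            rw [ih q (j+1) chars (by omega) hlen hdrop1]
            rw [hsd]
            conv_rhs => rw [maskLoopB.eq_def]
            rw [pvTakeSucc chars j hmlt, hget]
            simp [h1, h2, h3]
    · rw [maskLoopA, dif_neg hlt]
      rw [List.drop_eq_nil_of_le (by omega : src.length ≤ j)]
      simp [maskLoopB_nil, List.take_of_length_le (by omega : chars.length ≤ j)]

-- ===== VERDICT (by name: the statement is the Claim_ definition above) =====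
theorem mask_string_literals_py_spec : Claim_equal_mask_string_literals_py := by
  intro source _
  unfold Spec_mask_string_literals_py mask_string_literals_py mask_string_literals_py_alt
  have h := main_seg source.toList source.toList.length ' ' 0 source.toList (by omega) rfl rfl
  rw [h]
  simp
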